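-- pv_equiv track=rewrite | github.com/mikevink/advent-of-code | aoc/year2021/day08/__init__.py | map_patterns
-- ===== SOURCE A (Python) =====
-- def map_patterns(patterns: list[str], mapping: dict[str, int]) -> set[str]:
--     maybe: set[str] = set()
--     for pattern in patterns:
--         array: list[str] = ["0"] * 7
--         for c in pattern:
--             array[mapping[c]] = "1"
--         maybe.add("".join(array))
--     return maybe
-- ===== SOURCE B (Python) =====
-- def map_patterns(patterns: list[str], mapping: dict[str, int]) -> set[str]:
--     # Sort-then-scan: collect the distinct lit positions of each pattern, sort them,
--     # and emit the 7-char string as runs of "0" between consecutive lit positions --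
--     # no 7-slot array and no per-slot membership test.
--     result: set[str] = set()
--     for pattern in patterns:
--         idxs = sorted({mapping[c] for c in pattern})
--         parts: list[str] = []
--         prev = -1
--         for i in idxs:
--             parts.append("0" * (i - prev - 1))
--             parts.append("1")
--             prev = i
--         parts.append("0" * (6 - prev))
--         result.add("".join(parts))
--     return result
-- ===== Notes on version B (the rewrite author's own statement) =====
-- stated objective: alternative
-- what changed: B replaces A's random-access scatter into a mutable 7-slot array by a sort-then-scan: it sorts the distinct lit positions of each pattern and builds the string sequentially as runs of zeros between consecutive lit positions.
-- outside the precondition, e.g. on map_patterns(['a'], {'a': -1}): A returns {'0000001'}, B returns {'10000000'}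
import Mathlib
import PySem

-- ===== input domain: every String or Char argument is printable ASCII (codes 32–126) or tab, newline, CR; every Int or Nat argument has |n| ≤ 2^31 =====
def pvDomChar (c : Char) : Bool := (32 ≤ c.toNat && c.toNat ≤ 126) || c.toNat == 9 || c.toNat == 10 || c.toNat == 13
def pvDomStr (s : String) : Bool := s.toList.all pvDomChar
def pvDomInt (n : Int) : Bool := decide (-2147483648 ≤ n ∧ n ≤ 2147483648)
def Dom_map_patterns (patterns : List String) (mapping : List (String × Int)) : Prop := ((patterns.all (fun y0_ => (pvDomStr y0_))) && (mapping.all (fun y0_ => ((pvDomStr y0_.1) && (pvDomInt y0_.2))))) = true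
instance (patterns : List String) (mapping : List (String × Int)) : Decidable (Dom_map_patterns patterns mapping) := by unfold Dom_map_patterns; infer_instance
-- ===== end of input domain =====

-- B builds each 7-segment string by a sort-then-scan over the distinct lit positions
-- (runs of zeros between consecutive sorted positions) instead of A's random-access
-- scatter writes into a 7-slot array (alternative algorithm, same cost);
-- equivalence is claimed on Pre_ (see its comment).

-- ===== PORT A =====
-- array[mapping[c]] = "1": a missing key is a KeyError, an index outside [-7,7) an
-- IndexError (pySetD leaves the array unchanged there); both are excluded by Pre_.
def map_patterns (patterns : List String) (mapping : List (String × Int)) : List String :=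
  patterns.foldl (fun maybe pattern =>
    PySem.Set.add maybe (PySem.Str.join ""
      (pattern.toList.foldl (fun array c =>
        PySem.List.pySetD array ((PySem.Dict.get? (PySem.Dict.mk mapping) (String.ofList [c])).getD 0) "1")
        (List.replicate 7 "0")))) []

-- ===== PORT B =====
-- one step of B's inner loop: append the run of zeros and the "1", remember prev := i
def pvStep (a : List String × Int) (i : Int) : List String × Int :=
  (a.1 ++ [String.ofList (List.replicate (i - a.2 - 1).toNat '0'), "1"], i)
  -- "0" * n is "" for n < 0, hence .toNat (Python-exact)

def map_patterns_alt (patterns : List String) (mapping : List (String × Int)) : List String :=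
  patterns.foldl (fun result pattern =>
    let idxs : List Int :=
      PySem.List.sorted
        (PySem.Set.ofList (pattern.toList.map (fun c => (PySem.Dict.get? (PySem.Dict.mk mapping) (String.ofList [c])).getD 0)))
        (fun x => x)
    let fin : List String × Int := idxs.foldl pvStep ([], -1)
    PySem.Set.add result
      (PySem.Str.join "" (fin.1 ++ [String.ofList (List.replicate (6 - fin.2).toNat '0')]))) []

-- ===== PRECONDITION & SPEC =====
-- first-match value of the mapping at one-character key c (100 when the key is absent)
def pvVal (mapping : List (String × Int)) (c : Char) : Int :=
  (List.lookup (String.ofList [c]) mapping).getD 100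

-- Pre_ requires every character of every pattern to be a key of the mapping (else A
-- raises KeyError) with a value in [0,7): values outside [-7,7) make A raise IndexError,
-- and Pre_ also excludes inputs mapping a used character to a negative position in
-- -7..-1 — a corner outside the seven-segment domain 0..6 on which A's value (the
-- negative index wraps and lights segment v+7) and B's (a longer string with position
-- v counted from -1) are both accidents that no one would specify.  (getD 100: a
-- missing key yields 100, which the bound < 7 rejects.)
def Pre_map_patterns (patterns : List String) (mapping : List (String × Int)) : Prop :=
  (patterns.all (fun p => p.toList.all (fun c =>
    decide (0 ≤ pvVal mapping c) && decide (pvVal mapping c < 7)))) = true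
instance (patterns : List String) (mapping : List (String × Int)) : Decidable (Pre_map_patterns patterns mapping) := by unfold Pre_map_patterns; infer_instance
def pvWitness_map_patterns : List String × (List (String × Int)) :=
  (["ab", "b"], [("a", 0), ("b", 3)])

def Spec_map_patterns (patterns : List String) (mapping : List (String × Int)) (out : List String) : Prop := out = map_patterns_alt patterns mapping
instance (patterns : List String) (mapping : List (String × Int)) (out : List String) : Decidable (Spec_map_patterns patterns mapping out) := by unfold Spec_map_patterns; infer_instance

-- ===== CLAIM (what is proved, stated in full; the proofs are below) =====
def Claim_equal_map_patterns : Prop := ∀ (patterns : List String) (mapping : List (String × Int)), Dom_map_patterns patterns mapping → Pre_map_patterns patterns mapping → Spec_map_patterns patterns mapping (map_patterns patterns mapping)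

-- ===== LEMMAS AND PROOFS =====

theorem pvJoinNil (xs : List (List Char)) : PySem.Chars.join [] xs = xs.flatten := by
  induction xs with
  | nil => rfl
  | cons x xs ih =>
    cases xs with
    | nil => simp [PySem.Chars.join, List.intercalate]
    | cons y ys =>
      simp only [PySem.Chars.join, List.intercalate] at *
      simp_all [List.intersperse]

theorem pvPySetD_seven {arr : List String} (h7 : arr.length = 7) (v : Int)
    (hlo : 0 ≤ v) (hhi : v < 7) (s : String) :
    PySem.List.pySetD arr v s = arr.set v.toNat s := by
  simp only [PySem.List.pySetD, PySem.List.pySet?, PySem.List.pyIdx?, h7]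
  rw [if_pos hlo, if_pos (show v < ((7 : Nat) : Int) by exact_mod_cast hhi)]
  rfl

-- A's scatter loop, characterised slot by slot
theorem pvScatter_getD (s1 : String) (g : Char → Int) (l : List Char) (arr : List String)
    (h7 : arr.length = 7) (hb : ∀ c ∈ l, 0 ≤ g c ∧ g c < 7) :
    l.foldl (fun array c => PySem.List.pySetD array (g c) s1) arr
      = (List.range 7).map (fun k : Nat => if ∃ c ∈ l, g c = (k : Int) then s1 else arr.getD k s1) := by
  induction l generalizing arr with
  | nil =>
    apply List.ext_getElem
    · simp [h7]
    · intro k hk1 _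
      have hk : k < arr.length := by simpa using hk1
      simp only [List.foldl_nil, List.getElem_map, List.getElem_range]
      rw [if_neg (by rintro ⟨c, hc, -⟩; exact (List.not_mem_nil hc).elim : ¬ ∃ c ∈ ([] : List Char), g c = (k : Int))]
      rw [List.getD_eq_getElem?_getD, List.getElem?_eq_getElem hk]
      rfl
  | cons c l ih =>
    have hbc := hb c (by simp)
    have hidx : (g c).toNat < 7 := by omega
    rw [List.foldl_cons, pvPySetD_seven h7 (g c) hbc.1 hbc.2,
        ih (arr.set (g c).toNat s1) (by simp [h7]) (fun c' hc' => hb c' (by simp [hc']))]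
    apply List.map_congr_left
    intro k hk
    rw [List.mem_range] at hk
    by_cases hl : ∃ c' ∈ l, g c' = (k : Int)
    · have hcl : ∃ c' ∈ c :: l, g c' = (k : Int) := by
        obtain ⟨c', hc', he⟩ := hl; exact ⟨c', by simp [hc'], he⟩
      rw [if_pos hl, if_pos hcl]
    · by_cases hc : g c = (k : Int)
      · have hcl : ∃ c' ∈ c :: l, g c' = (k : Int) := ⟨c, by simp, hc⟩
        rw [if_neg hl, if_pos hcl]
        have : (g c).toNat = k := by omega
        subst this
        simp [List.getD_eq_getElem?_getD, h7, hidx]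
      · have hnone : ¬ ∃ c' ∈ c :: l, g c' = (k : Int) := by
          rintro ⟨c', hc', he⟩
          rcases List.mem_cons.mp hc' with rfl | hm
          · exact hc he
          · exact hl ⟨c', hm, he⟩
        have hne : (g c).toNat ≠ k := by omega
        rw [if_neg hl, if_neg hnone]
        simp [List.getD_eq_getElem?_getD, List.getElem?_set_ne hne]

-- the indicator chars for slots prev+1, prev+2, … (n of them)
def pvInd (s : List Int) (prev : Int) (n : Nat) : List Char :=
  (List.range n).map (fun j : Nat => if ((prev + 1 + (j : Int)) ∈ s) then '1' else '0')

-- B's run-building scan equals the indicator chars for the remaining slots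
theorem pvRun (s : List Int) : ∀ (prev : Int) (acc : List String),
    s.Pairwise (· < ·) → (∀ x ∈ s, prev < x ∧ x < 7) → -1 ≤ prev → prev ≤ 6 →
    (((s.foldl pvStep (acc, prev)).1
        ++ [String.ofList (List.replicate (6 - (s.foldl pvStep (acc, prev)).2).toNat '0')]).map String.toList).flatten
      = (acc.map String.toList).flatten ++ pvInd s prev (6 - prev).toNat := by
  induction s with
  | nil =>
    intro prev acc _ _ _ _
    simp only [List.foldl_nil, List.map_append, List.flatten_append, pvInd]
    have : (List.range (6 - prev).toNat).map
        (fun j : Nat => if ((prev + 1 + (j : Int)) ∈ ([] : List Int)) then '1' else '0')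
        = (List.range (6 - prev).toNat).map (fun _ => '0') := by
      apply List.map_congr_left; intro j _; simp
    rw [this]
    simp [List.map_const']
  | cons i s ih =>
    intro prev acc hpw hb hlo hhi
    have hbi := hb i (by simp)
    have hgt : ∀ x ∈ s, i < x ∧ x < 7 := by
      intro x hx
      exact ⟨(List.pairwise_cons.mp hpw).1 x hx, (hb x (by simp [hx])).2⟩
    rw [List.foldl_cons]
    rw [show pvStep (acc, prev) i
        = (acc ++ [String.ofList (List.replicate (i - prev - 1).toNat '0'), "1"], i) from rfl]
    rw [ih i _ (List.pairwise_cons.mp hpw).2 hgt (by omega) (by omega)]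
    -- arithmetic split of the slot range
    have hsplit : (6 - prev).toNat = (i - prev - 1).toNat + 1 + (6 - i).toNat := by omega
    have hIndCons : pvInd (i :: s) prev (6 - prev).toNat
        = List.replicate (i - prev - 1).toNat '0' ++ ['1'] ++ pvInd s i (6 - i).toNat := by
      unfold pvInd
      rw [hsplit, List.range_add, List.range_succ, List.map_append, List.map_append, List.map_map]
      congr 1
      congr 1
      · have : ∀ j ∈ List.range (i - prev - 1).toNat,
            (if ((prev + 1 + (j : Int)) ∈ i :: s) then '1' else '0') = '0' := by
          intro j hj
          rw [List.mem_range] at hj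
          rw [if_neg]
          intro hmem'
          rcases List.mem_cons.mp hmem' with h | h
          · omega
          · have := (hgt _ h).1; omega
        rw [List.map_congr_left this]
        simp [List.map_const']
      · simp only [List.map_singleton]
        have hi : prev + 1 + (((i - prev - 1).toNat : Nat) : Int) = i := by omega
        rw [if_pos (by rw [hi]; exact List.mem_cons_self)]
      · apply List.map_congr_left
        intro j _
        have h1 : prev + 1 + (((i - prev - 1).toNat + 1 + j : Nat) : Int) = i + 1 + (j : Int) := by
          push_cast; omega
        simp only [Function.comp_apply, h1]
        congr 1
        simp only [List.mem_cons, eq_iff_iff]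
        constructor
        · rintro (h | h)
          · omega
          · exact h
        · exact fun h => Or.inr h

    rw [hIndCons]
    simp [List.flatten_append, List.append_assoc]

theorem pvMapToList (P : Nat → Prop) [DecidablePred P] (l : List Nat) :
    ((l.map (fun k => if P k then "1" else "0")).map String.toList).flatten
      = l.map (fun k => if P k then '1' else '0') := by
  induction l with
  | nil => rfl
  | cons x xs ih =>
    simp only [List.map_cons, List.flatten_cons, ih]
    split_ifs <;> rfl

theorem pvGetD_eq (o : Option Int) (h : o.getD 100 < 7) : o.getD 0 = o.getD 100 := by
  cases o with
  | none => simp at h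
  | some v => rfl

theorem pvLookup_eq (mapping : List (String × Int)) (k : String) :
    List.lookup k mapping = PySem.Dict.get? (PySem.Dict.mk mapping) k := by
  induction mapping with
  | nil => rfl
  | cons kv rest ih =>
    obtain ⟨a, b⟩ := kv
    by_cases h : k = a
    · subst h
      simp [List.lookup, PySem.Dict.get?, List.find?]
    · have h1 : (k == a) = false := beq_eq_false_iff_ne.mpr h
      have h2 : (a == k) = false := beq_eq_false_iff_ne.mpr (Ne.symm h)
      simp only [List.lookup, h1, PySem.Dict.get?, List.find?, h2]
      exact ih

-- ===== VERDICT (by name: the statement is the Claim_ definition above) =====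
theorem map_patterns_spec : Claim_equal_map_patterns := by
  intro patterns mapping _ hpre
  unfold Spec_map_patterns
  unfold Pre_map_patterns at hpre
  simp only [List.all_eq_true, Bool.and_eq_true, decide_eq_true_eq] at hpre
  unfold map_patterns map_patterns_alt
  apply PySem.List.foldl_congr_mem
  intro acc p hp
  set g : Char → Int := fun c => (PySem.Dict.get? (PySem.Dict.mk mapping) (String.ofList [c])).getD 0 with hg
  have hb : ∀ c ∈ p.toList, 0 ≤ g c ∧ g c < 7 := by
    intro c hc
    have h := hpre p hp c hc
    rw [pvVal, pvLookup_eq] at h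
    have := pvGetD_eq (PySem.Dict.get? (PySem.Dict.mk mapping) (String.ofList [c])) h.2
    constructor
    · rw [hg]; simp only; omega
    · rw [hg]; simp only; omega
  -- the sorted distinct positions
  set s : List Int := PySem.List.sorted (PySem.Set.ofList (p.toList.map g)) (fun x => x) with hs
  have hmem : ∀ k : Int, k ∈ s ↔ ∃ c ∈ p.toList, g c = k := by
    intro k
    rw [hs, PySem.List.mem_sorted, PySem.Set.mem_ofList, List.mem_map]
  have hpw : s.Pairwise (· < ·) := PySem.List.sorted_ofList_pairwise_lt _
  have hbs : ∀ x ∈ s, (-1 : Int) < x ∧ x < 7 := by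
    intro x hx
    obtain ⟨c, hc, he⟩ := (hmem x).mp hx
    have := hb c hc
    omega
  congr 1
  apply String.toList_inj.mp
  rw [PySem.Str.toList_join, PySem.Str.toList_join,
      show "".toList = ([] : List Char) from rfl, pvJoinNil, pvJoinNil]
  -- A's side: name the per-character position function g
  have hfun : (fun (array : List String) (c : Char) =>
      PySem.List.pySetD array ((PySem.Dict.get? (PySem.Dict.mk mapping) (String.ofList [c])).getD 0) "1")
      = (fun (array : List String) (c : Char) => PySem.List.pySetD array (g c) "1") := rfl
  rw [hfun, pvScatter_getD "1" g p.toList (List.replicate 7 "0") (by simp) hb]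
  -- B's side
  rw [pvRun s (-1) [] hpw hbs (by omega) (by omega)]
  simp only [List.map_nil, List.flatten_nil, List.nil_append]
  rw [show ((6 : Int) - (-1)).toNat = 7 from rfl]
  have h1 : ∀ k ∈ List.range 7,
      (fun k : Nat => if ∃ c ∈ p.toList, g c = (k : Int) then "1" else (List.replicate 7 "0").getD k "1") k
        = (fun k : Nat => if ((k : Int) ∈ s) then "1" else "0") k := by
    intro k hk
    rw [List.mem_range] at hk
    show (if ∃ c ∈ p.toList, g c = (k : Int) then "1" else (List.replicate 7 "0").getD k "1")
        = (if ((k : Int) ∈ s) then "1" else "0")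
    by_cases h : ∃ c ∈ p.toList, g c = (k : Int)
    · rw [if_pos h, if_pos ((hmem _).mpr h)]
    · rw [if_neg h, if_neg (fun hc => h ((hmem _).mp hc))]
      rw [List.getD_eq_getElem?_getD, List.getElem?_replicate, if_pos hk]
      rfl
  rw [List.map_congr_left h1]
  unfold pvInd
  have h2 : ∀ j ∈ List.range 7,
      (if ((-1 + 1 + (j : Int)) ∈ s) then '1' else '0') = (if ((j : Int) ∈ s) then '1' else '0') := by
    intro j _
    have hj : (-1 + 1 + (j : Int)) = (j : Int) := by omega
    rw [hj]
  rw [List.map_congr_left h2]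
  exact pvMapToList (fun k => (k : Int) ∈ s) (List.range 7)
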